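-- pv_equiv track=rewrite | github.com/ErikWare/model_tuning | src/utils/speech_utils.py | remove_pre_thinking
-- ===== SOURCE A (Python) =====
-- def remove_pre_thinking(text: str) -> str:
--     """
--     Removes text prior to any recognized 'thinking' tags, making it more flexible.
--     """
--     thinking_tags = ["[thinking]", "[internal]", "[chain-of-thought]", "(consideration)"]
--     earliest_index = -1
--     chosen_tag = None
--
--     for tag in thinking_tags:
--         idx = text.find(tag)
--         if idx != -1 and (earliest_index == -1 or idx < earliest_index):
--             earliest_index = idx
--             chosen_tag = tag
--
--     if earliest_index != -1 and chosen_tag is not None: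
--         return text[earliest_index + len(chosen_tag):].strip()
--     return text
-- ===== SOURCE B (Python) =====
-- def remove_pre_thinking(text: str) -> str:
--     """
--     Removes text prior to any recognized 'thinking' tags, making it more flexible.
--     """
--     thinking_tags = ["[thinking]", "[internal]", "[chain-of-thought]", "(consideration)"]
--     for i in range(len(text)):
--         for tag in thinking_tags:
--             if text.startswith(tag, i):
--                 return text[i + len(tag):].strip()
--     return text
-- ===== Notes on version B (the rewrite author's own statement) =====
-- stated objective: alternative
-- what changed: A runs four independent str.find scans and keeps the earliest index with first-listed tie-breaking; B makes a single left-to-right scan over positions, testing the tags in order with startswith at each position, and returns as soon as one matches.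
import Mathlib
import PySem

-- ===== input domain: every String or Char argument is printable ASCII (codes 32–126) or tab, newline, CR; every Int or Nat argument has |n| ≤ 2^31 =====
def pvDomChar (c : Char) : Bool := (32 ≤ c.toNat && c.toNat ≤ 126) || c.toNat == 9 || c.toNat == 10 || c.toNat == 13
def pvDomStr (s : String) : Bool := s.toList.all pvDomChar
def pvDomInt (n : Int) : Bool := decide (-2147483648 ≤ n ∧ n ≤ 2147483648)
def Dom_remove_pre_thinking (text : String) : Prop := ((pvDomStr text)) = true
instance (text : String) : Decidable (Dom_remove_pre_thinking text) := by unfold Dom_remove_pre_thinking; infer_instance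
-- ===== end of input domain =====

-- B replaces A's four independent str.find passes (plus earliest-index bookkeeping) by ONE
-- left-to-right scan that tries the tags in order at each position; same return value everywhere.

-- ===== PORT A =====
-- Shared helper: the tag list, in the order both A and Source B try them; and the body of A's 'for tag in thinking_tags' loop (A-side)
-- (track the earliest index and its tag; a found index beats -1 or any larger index).
def aTags : List (List Char) :=
  ["[thinking]".toList, "[internal]".toList, "[chain-of-thought]".toList, "(consideration)".toList]

def pickStep (f : List Char → Int) (st : Int × Option (List Char)) (tag : List Char) :
    Int × Option (List Char) :=
  let idx := f tag
  if idx ≠ -1 ∧ (st.1 = -1 ∨ idx < st.1) then (idx, some tag) else st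

-- A: run the loop over the four tags with text.find, then return
-- text[earliest+len(tag):].strip() if a tag was found, else text. Ported on List Char via PySem.Chars.
def remove_pre_thinking (text : String) : String :=
  let st := aTags.foldl (pickStep (fun tag => PySem.Chars.find text.toList tag)) ((-1 : Int), none)
  match st.2 with
  | some tag =>
      if st.1 ≠ -1 then
        String.ofList (PySem.Chars.strip
          (PySem.Chars.slice text.toList (some (st.1 + (PySem.Chars.len tag : Int))) none))
      else text
  | none => text

-- ===== PORT B =====
-- Source B's 'for i in range(len(text)): for tag in tags: if text.startswith(tag, i)' loop,
-- as the structural left-to-right scan over the suffixes of the string.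
def scanTagsB : List Char → Option (List Char)
  | [] => none
  | c :: rest =>
    match aTags.find? (fun tag => PySem.Chars.startswith (c :: rest) tag) with
    | some tag => some ((c :: rest).drop tag.length)
    | none => scanTagsB rest

def remove_pre_thinking_alt (text : String) : String :=
  match scanTagsB text.toList with
  | some r => String.ofList (PySem.Chars.strip r)
  | none => text

-- ===== PRECONDITION & SPEC =====
def Spec_remove_pre_thinking (text : String) (out : String) : Prop := out = remove_pre_thinking_alt text
instance (text : String) (out : String) : Decidable (Spec_remove_pre_thinking text out) := by unfold Spec_remove_pre_thinking; infer_instance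

-- ===== CLAIM (what is proved, stated in full; the proofs are below) =====
def Claim_equal_remove_pre_thinking : Prop := ∀ (text : String), Dom_remove_pre_thinking text → Spec_remove_pre_thinking text (remove_pre_thinking text)

-- ===== LEMMAS AND PROOFS =====

def pickF (f : List Char → Int) (tags : List (List Char)) : Int × Option (List Char) :=
  tags.foldl (pickStep f) ((-1 : Int), none)

-- A's whole body at list level.
def aCore (s : List Char) : Option (List Char) :=
  match pickF (fun tag => PySem.Chars.find s tag) aTags with
  | (e, some tag) => if e ≠ -1 then some (s.drop (e + (tag.length : Int)).toNat) else none
  | (_, none) => none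

-- the state invariant of A's loop
def PInv (r : Int × Option (List Char)) : Prop :=
  (r.2 = none → r.1 = -1) ∧ (∀ t, r.2 = some t → 0 ≤ r.1)

theorem fold_pinv (f : List Char → Int) (tags : List (List Char))
    (hf : ∀ t ∈ tags, -1 ≤ f t) (st : Int × Option (List Char)) (h : PInv st) :
    PInv (tags.foldl (pickStep f) st) := by
  induction tags generalizing st with
  | nil => exact h
  | cons t ts ih =>
    simp only [List.foldl_cons]
    apply ih (fun u hu => hf u (List.mem_cons_of_mem _ hu))
    unfold pickStep
    dsimp only
    split_ifs with hc
    · exact ⟨by simp, fun u hu => by have := hf t (by simp); omega⟩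
    · exact h

theorem foldl_pick_none_or_ge_one (f : List Char → Int) (pre : List (List Char))
    (hpre : ∀ u ∈ pre, f u = -1 ∨ 1 ≤ f u) (st : Int × Option (List Char))
    (hst : st.1 = -1 ∨ 1 ≤ st.1) :
    (pre.foldl (pickStep f) st).1 = -1 ∨ 1 ≤ (pre.foldl (pickStep f) st).1 := by
  induction pre generalizing st with
  | nil => exact hst
  | cons t ts ih =>
    simp only [List.foldl_cons]
    apply ih (fun u hu => hpre u (List.mem_cons_of_mem _ hu))
    unfold pickStep
    dsimp only
    split_ifs with hc
    · have := hpre t (by simp); simp; omega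
    · exact hst

theorem foldl_pick_zero_fixed (f : List Char → Int) (post : List (List Char))
    (hpost : ∀ u ∈ post, -1 ≤ f u) (t : List Char) :
    post.foldl (pickStep f) ((0 : Int), some t) = ((0 : Int), some t) := by
  induction post with
  | nil => rfl
  | cons u us ih =>
    simp only [List.foldl_cons]
    have hu := hpost u (by simp)
    have : pickStep f ((0 : Int), some t) u = ((0 : Int), some t) := by
      unfold pickStep; dsimp only
      rw [if_neg (by push Not; intro h1; omega)]
    rw [this]
    exact ih (fun v hv => hpost v (List.mem_cons_of_mem _ hv))

def shiftSt (st : Int × Option (List Char)) : Int × Option (List Char) :=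
  if st.1 = -1 then st else (st.1 + 1, st.2)

-- A's loop commutes with shifting every found index by one
theorem fold_shift (f g : List Char → Int) (tags : List (List Char))
    (hfg : ∀ t ∈ tags, (g t = -1 → f t = -1) ∧ (g t ≠ -1 → 0 ≤ g t ∧ f t = g t + 1))
    (st : Int × Option (List Char)) (h : PInv st) :
    tags.foldl (pickStep f) (shiftSt st) = shiftSt (tags.foldl (pickStep g) st) := by
  induction tags generalizing st with
  | nil => rfl
  | cons t ts ih =>
    have hst : st.1 = -1 ∨ 0 ≤ st.1 := by
      rcases st with ⟨e, x⟩
      cases x with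
      | none => left; exact h.1 rfl
      | some t' => right; exact h.2 t' rfl
    have ht := hfg t (by simp)
    simp only [List.foldl_cons]
    have hstep : pickStep f (shiftSt st) t = shiftSt (pickStep g st t) := by
      by_cases hg : g t = -1
      · have hft := ht.1 hg
        unfold pickStep; dsimp only
        rw [if_neg (by simp [hft]), if_neg (by simp [hg])]
      · obtain ⟨hg0, hfe⟩ := ht.2 hg
        rcases hst with he | he
        · have hsh : shiftSt st = st := by unfold shiftSt; rw [if_pos he]
          rw [hsh]
          unfold pickStep; dsimp only
          rw [if_pos ⟨by omega, Or.inl he⟩, if_pos ⟨hg, Or.inl he⟩]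
          unfold shiftSt; rw [if_neg (by omega)]; simp [hfe]
        · have hne : ¬ st.1 = -1 := by omega
          have hsh : shiftSt st = (st.1 + 1, st.2) := by unfold shiftSt; rw [if_neg hne]
          rw [hsh]
          unfold pickStep; dsimp only
          by_cases hlt : g t < st.1
          · rw [if_pos ⟨by omega, Or.inr (by omega)⟩, if_pos ⟨hg, Or.inr hlt⟩]
            unfold shiftSt; rw [if_neg (by omega)]; simp [hfe]
          · rw [if_neg (by omega), if_neg (by omega)]
            unfold shiftSt; rw [if_neg hne]
    rw [hstep]
    apply ih (fun u hu => hfg u (List.mem_cons_of_mem _ hu))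
    unfold pickStep; dsimp only
    split_ifs with hc
    · exact ⟨by simp, fun u hu => by dsimp; omega⟩
    · exact h

-- the loop picks a tag found at index 0 when no earlier-listed tag matches there
theorem pickF_first_zero (f : List Char → Int) (pre post : List (List Char)) (t : List Char)
    (ht : f t = 0) (hpre : ∀ u ∈ pre, f u = -1 ∨ 1 ≤ f u) (hpost : ∀ u ∈ post, -1 ≤ f u) :
    pickF f (pre ++ t :: post) = ((0 : Int), some t) := by
  unfold pickF
  rw [List.foldl_append]
  have h1 := foldl_pick_none_or_ge_one f pre hpre ((-1 : Int), none) (Or.inl rfl)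
  simp only [List.foldl_cons]
  have hstep : ∀ r : Int × Option (List Char), r.1 = -1 ∨ 1 ≤ r.1 →
      pickStep f r t = ((0 : Int), some t) := by
    intro r hr
    unfold pickStep; dsimp only
    rw [ht, if_pos ⟨by omega, by omega⟩]
  rw [hstep _ h1]
  exact foldl_pick_zero_fixed f post hpost t

-- find s sub = k as soon as sub occurs at k and at no earlier position
theorem find_eq_of_first (s sub : List Char) (k : Nat)
    (h1 : sub <+: s.drop k) (h2 : ∀ i < k, ¬ sub <+: s.drop i) :
    PySem.Chars.find s sub = (k : Int) := by
  have hin : PySem.Chars.isIn sub s = true :=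
    (PySem.Chars.exists_prefix_drop_iff_isIn sub s).1 ⟨k, h1⟩
  have hnn : 0 ≤ PySem.Chars.find s sub := by
    rw [PySem.Chars.find_nonneg_iff]
    exact (PySem.Chars.isIn_iff_infix sub s).1 hin
  obtain ⟨hp, hmin⟩ := PySem.Chars.find_spec hnn
  set n := (PySem.Chars.find s sub).toNat with hn
  rcases Nat.lt_trichotomy n k with h | h | h
  · exact absurd hp (h2 n h)
  · omega
  · exact absurd h1 (hmin k h)

-- one-step unfolding of Python's str.find on a cons
theorem find_cons (c : Char) (s sub : List Char) :
    PySem.Chars.find (c :: s) sub =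
      if PySem.Chars.startswith (c :: s) sub then 0
      else if PySem.Chars.find s sub = -1 then -1 else PySem.Chars.find s sub + 1 := by
  split_ifs with hsw hnf
  · exact find_eq_of_first (c :: s) sub 0 ((PySem.Chars.startswith_iff _ _).1 hsw)
      (fun i hi => absurd hi (by omega))
  · rw [PySem.Chars.find_eq_neg_one_iff] at hnf
    rw [PySem.Chars.find_eq_neg_one_iff]
    intro hinf
    rcases List.infix_cons_iff.1 hinf with hpre | hinf'
    · exact hsw ((PySem.Chars.startswith_iff _ _).2 hpre)
    · exact hnf hinf'
  · have hnn : 0 ≤ PySem.Chars.find s sub := by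
      have := PySem.Chars.neg_one_le_find s sub; omega
    obtain ⟨hp, hmin⟩ := PySem.Chars.find_spec hnn
    have := find_eq_of_first (c :: s) sub ((PySem.Chars.find s sub).toNat + 1)
      (by simpa using hp)
      (by
        intro i hi
        match i with
        | 0 => exact fun hc => hsw ((PySem.Chars.startswith_iff _ _).2 (by simpa using hc))
        | j + 1 => exact fun hc => hmin j (by omega) (by simpa using hc))
    rw [this]; omega

-- a tag that does not match at position 0 is found at -1 or at index ≥ 1
theorem find_skip (c : Char) (rest tag : List Char)
    (hsw : ¬ PySem.Chars.startswith (c :: rest) tag = true) :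
    PySem.Chars.find (c :: rest) tag = -1 ∨ 1 ≤ PySem.Chars.find (c :: rest) tag := by
  rw [find_cons, if_neg hsw]
  have := PySem.Chars.neg_one_le_find rest tag
  split_ifs with h <;> omega

-- relation between find on c :: rest and find on rest when tag does not match at 0
theorem find_shift_rel (c : Char) (rest tag : List Char)
    (hsw : ¬ PySem.Chars.startswith (c :: rest) tag = true) :
    (PySem.Chars.find rest tag = -1 → PySem.Chars.find (c :: rest) tag = -1) ∧
    (PySem.Chars.find rest tag ≠ -1 →
      0 ≤ PySem.Chars.find rest tag ∧
        PySem.Chars.find (c :: rest) tag = PySem.Chars.find rest tag + 1) := by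
  rw [find_cons, if_neg hsw]
  have := PySem.Chars.neg_one_le_find rest tag
  constructor
  · intro h; rw [if_pos h]
  · intro h; rw [if_neg h]; exact ⟨by omega, rfl⟩

-- A's body equals the single scan
theorem aCore_eq_scan (s : List Char) : aCore s = scanTagsB s := by
  induction s with
  | nil => decide
  | cons c rest ih =>
    by_cases h1 : PySem.Chars.startswith (c :: rest) "[thinking]".toList = true
    · have hA : pickF (fun tag => PySem.Chars.find (c :: rest) tag) aTags
          = ((0 : Int), some "[thinking]".toList) := by
        have := pickF_first_zero (fun tag => PySem.Chars.find (c :: rest) tag)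
          [] ["[internal]".toList, "[chain-of-thought]".toList, "(consideration)".toList]
          "[thinking]".toList
          (by dsimp only; rw [find_cons, if_pos h1])
          (by intro u hu; simp at hu)
          (fun u _ => PySem.Chars.neg_one_le_find _ u)
        exact this
      unfold aCore
      rw [hA]
      have hb1 := h1; simp at hb1
      simp [scanTagsB, aTags, hb1]
    · by_cases h2 : PySem.Chars.startswith (c :: rest) "[internal]".toList = true
      · have hA : pickF (fun tag => PySem.Chars.find (c :: rest) tag) aTags
            = ((0 : Int), some "[internal]".toList) := by
          have := pickF_first_zero (fun tag => PySem.Chars.find (c :: rest) tag)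
            ["[thinking]".toList] ["[chain-of-thought]".toList, "(consideration)".toList]
            "[internal]".toList
            (by dsimp only; rw [find_cons, if_pos h2])
            (by
              intro u hu; simp at hu; subst hu
              exact find_skip c rest _ h1)
            (fun u _ => PySem.Chars.neg_one_le_find _ u)
          exact this
        unfold aCore
        rw [hA]
        have hb1 := h1; have hb2 := h2; simp at hb1 hb2
        simp [scanTagsB, aTags, List.find?, hb1, hb2]
      · by_cases h3 : PySem.Chars.startswith (c :: rest) "[chain-of-thought]".toList = true
        · have hA : pickF (fun tag => PySem.Chars.find (c :: rest) tag) aTags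
              = ((0 : Int), some "[chain-of-thought]".toList) := by
            have := pickF_first_zero (fun tag => PySem.Chars.find (c :: rest) tag)
              ["[thinking]".toList, "[internal]".toList] ["(consideration)".toList]
              "[chain-of-thought]".toList
              (by dsimp only; rw [find_cons, if_pos h3])
              (by
                intro u hu; simp at hu
                rcases hu with hu | hu <;> subst hu
                · exact find_skip c rest _ h1
                · exact find_skip c rest _ h2)
              (fun u _ => PySem.Chars.neg_one_le_find _ u)
            exact this
          unfold aCore
          rw [hA]
          have hb1 := h1; have hb2 := h2; have hb3 := h3; simp at hb1 hb2 hb3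
          simp [scanTagsB, aTags, List.find?, hb1, hb2, hb3]
        · by_cases h4 : PySem.Chars.startswith (c :: rest) "(consideration)".toList = true
          · have hA : pickF (fun tag => PySem.Chars.find (c :: rest) tag) aTags
                = ((0 : Int), some "(consideration)".toList) := by
              have := pickF_first_zero (fun tag => PySem.Chars.find (c :: rest) tag)
                ["[thinking]".toList, "[internal]".toList, "[chain-of-thought]".toList] []
                "(consideration)".toList
                (by dsimp only; rw [find_cons, if_pos h4])
                (by
                  intro u hu; simp at hu
                  rcases hu with hu | hu | hu <;> subst hu
                  · exact find_skip c rest _ h1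
                  · exact find_skip c rest _ h2
                  · exact find_skip c rest _ h3)
                (by intro u hu; simp at hu)
              exact this
            unfold aCore
            rw [hA]
            have hb1 := h1; have hb2 := h2; have hb3 := h3; have hb4 := h4
            simp at hb1 hb2 hb3 hb4
            simp [scanTagsB, aTags, List.find?, hb1, hb2, hb3, hb4]
          · -- no tag matches at position 0: both sides defer to the tail
            have hfg : ∀ t ∈ aTags,
                (PySem.Chars.find rest t = -1 → PySem.Chars.find (c :: rest) t = -1) ∧
                (PySem.Chars.find rest t ≠ -1 →
                  0 ≤ PySem.Chars.find rest t ∧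
                    PySem.Chars.find (c :: rest) t = PySem.Chars.find rest t + 1) := by
              intro t ht
              simp [aTags] at ht
              rcases ht with ht | ht | ht | ht <;> subst ht
              · exact find_shift_rel c rest _ h1
              · exact find_shift_rel c rest _ h2
              · exact find_shift_rel c rest _ h3
              · exact find_shift_rel c rest _ h4
            have hshift : pickF (fun tag => PySem.Chars.find (c :: rest) tag) aTags
                = shiftSt (pickF (fun tag => PySem.Chars.find rest tag) aTags) := by
              have := fold_shift (fun tag => PySem.Chars.find (c :: rest) tag)
                (fun tag => PySem.Chars.find rest tag) aTags hfg ((-1 : Int), none)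
                ⟨fun _ => rfl, fun t ht => by simp at ht⟩
              exact this
            have hinv : PInv (pickF (fun tag => PySem.Chars.find rest tag) aTags) :=
              fold_pinv _ aTags (fun t _ => PySem.Chars.neg_one_le_find _ t) _
                ⟨fun _ => rfl, fun t ht => by simp at ht⟩
            have hB : scanTagsB (c :: rest) = scanTagsB rest := by
              have hb1 := h1; have hb2 := h2; have hb3 := h3; have hb4 := h4
              simp at hb1 hb2 hb3 hb4
              simp [scanTagsB, aTags, List.find?, hb1, hb2, hb3, hb4]
            rw [hB, ← ih]
            unfold aCore
            rw [hshift]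
            rcases hg : pickF (fun tag => PySem.Chars.find rest tag) aTags with ⟨e, x⟩
            rw [hg] at hinv
            cases x with
            | none =>
              have he : e = -1 := hinv.1 rfl
              subst he
              rfl
            | some tag =>
              have he0 : (0 : Int) ≤ e := hinv.2 tag rfl
              have hsh : shiftSt (e, some tag) = (e + 1, some tag) := by
                unfold shiftSt; rw [if_neg (by omega)]
              rw [hsh]
              dsimp only
              rw [if_pos (by omega : e + 1 ≠ -1), if_pos (by omega : e ≠ -1)]
              have hidx : (e + 1 + (tag.length : Int)).toNat
                  = (e + (tag.length : Int)).toNat + 1 := by omega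
              rw [hidx, List.drop_succ_cons]

theorem portA_eq (text : String) :
    remove_pre_thinking text =
      match aCore text.toList with
      | some r => String.ofList (PySem.Chars.strip r)
      | none => text := by
  have hinv : PInv (pickF (fun tag => PySem.Chars.find text.toList tag) aTags) :=
    fold_pinv _ aTags (fun t _ => PySem.Chars.neg_one_le_find _ t) _
      ⟨fun _ => rfl, fun t ht => by simp at ht⟩
  unfold remove_pre_thinking aCore
  unfold pickF at hinv ⊢
  generalize hG : aTags.foldl (pickStep (fun tag => PySem.Chars.find text.toList tag))
      ((-1 : Int), none) = r at hinv ⊢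
  obtain ⟨e, x⟩ := r
  cases x with
  | none => rfl
  | some tag =>
    have he0 : (0 : Int) ≤ e := hinv.2 tag rfl
    have hne : e ≠ -1 := by omega
    dsimp only
    rw [if_pos hne, if_pos hne]
    have hlen : (PySem.Chars.len tag : Int) = (tag.length : Int) := by
      rw [PySem.Chars.len_eq]
    rw [hlen, PySem.Chars.slice_eq_listSlice,
      PySem.List.slice_from text.toList (a := e + (tag.length : Int)) (by omega)]

-- ===== VERDICT (by name: the statement is the Claim_ definition above) =====
theorem remove_pre_thinking_spec : Claim_equal_remove_pre_thinking := by
  intro text _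
  unfold Spec_remove_pre_thinking
  rw [portA_eq, aCore_eq_scan]
  rfl
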